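-- pv_equiv track=rewrite | github.com/naitkaci-anis/connect4 | web_backend/ai_engine.py | _build_cell_masks
-- ===== SOURCE A (Python) =====
-- from typing import List, Optional, Dict, Tuple
--
-- _MASK_CACHE: Dict[Tuple[int,int], Tuple] = {}
--
-- def _build_cell_masks(rows: int, cols: int, win_masks: List[int]) -> List[List[int]]:
--     cm: List[List[int]] = [[] for _ in range(rows*cols)]
--     for m in win_masks:
--         t = m
--         while t:
--             lsb = t & -t
--             cm[lsb.bit_length()-1].append(m)
--             t ^= lsb
--     _MASK_CACHE[(rows, cols)] = (win_masks, cm)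
--     return cm
-- ===== SOURCE B (Python) =====
-- from typing import List, Optional, Dict, Tuple
--
-- _MASK_CACHE: Dict[Tuple[int, int], Tuple] = {}
--
-- def _build_cell_masks(rows: int, cols: int, win_masks: List[int]) -> List[List[int]]:
--     # Cell-major: for each cell, scan win_masks for masks containing that bit.
--     cm = [[m for m in win_masks if (m >> cell) & 1] for cell in range(rows * cols)]
--     _MASK_CACHE[(rows, cols)] = (win_masks, cm)
--     return cm
-- ===== Notes on version B (the rewrite author's own statement) =====
-- stated objective: simpler
-- what changed: A is mask-major, extracting each mask's set bits one lsb at a time (t & -t, bit_length) and appending into a mutable table; B is cell-major, building each cell's list directly as a comprehension filtering win_masks by a bit-membership test, with no mutable table and no lsb extraction.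
import Mathlib
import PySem

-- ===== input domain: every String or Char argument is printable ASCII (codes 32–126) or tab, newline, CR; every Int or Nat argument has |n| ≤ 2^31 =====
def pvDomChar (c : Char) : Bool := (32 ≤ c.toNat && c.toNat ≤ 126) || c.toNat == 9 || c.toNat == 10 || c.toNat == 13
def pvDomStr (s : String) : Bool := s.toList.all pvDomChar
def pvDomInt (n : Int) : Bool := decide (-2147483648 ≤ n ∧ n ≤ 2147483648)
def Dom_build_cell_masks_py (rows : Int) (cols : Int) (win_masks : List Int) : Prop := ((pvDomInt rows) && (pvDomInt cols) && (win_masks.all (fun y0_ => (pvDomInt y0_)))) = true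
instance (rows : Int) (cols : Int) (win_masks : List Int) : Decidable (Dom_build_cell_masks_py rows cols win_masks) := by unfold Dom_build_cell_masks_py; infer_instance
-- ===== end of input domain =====

-- B builds the table cell-major (one filter of win_masks per cell) instead of A's
-- mask-major lsb-extraction into a mutable table; equivalence is about the RETURN
-- value only (both Pythons also write the module-level _MASK_CACHE identically).

-- ===== PORT A =====


-- fuel makes the recursion structural; fuel = t suffices since each step strictly
-- shrinks t (it clears t's lowest set bit), so the 'fuel = 0' branch is never the
-- one that stops the loop when called as below.
def pvLsbLoop (m : Int) (fuel : Nat) (t : Nat) (cm : List (List Int)) : List (List Int) :=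
  match fuel with
  | 0 => cm
  | fuel + 1 =>
    if t = 0 then cm
    else
      let lsb := t - (t &&& (t - 1))      -- lsb = t & -t (t > 0: lowest set bit)
      let k := lsb.log2                   -- lsb.bit_length() - 1
      pvLsbLoop m fuel (t ^^^ lsb) (cm.set k ((cm.getD k []) ++ [m]))

def build_cell_masks_py (rows : Int) (cols : Int) (win_masks : List Int) : List (List Int) :=
  -- cm starts as [[] for _ in range(rows*cols)]; then
  -- for m in win_masks: t = m; while t: ...   (negative m, which makes Python
  -- raise IndexError, is excluded by Pre_; t.toNat is exact for t ≥ 0)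
  win_masks.foldl (fun cm m => pvLsbLoop m m.toNat m.toNat cm) (List.replicate (rows * cols).toNat [])

-- ===== PORT B =====

def build_cell_masks_py_alt (rows : Int) (cols : Int) (win_masks : List Int) : List (List Int) :=
  -- [[m for m in win_masks if (m >> cell) & 1] for cell in range(rows*cols)]
  -- (m >> cell) & 1 ported via m.toNat: exact for m ≥ 0, which Pre_ guarantees
  (List.range (rows * cols).toNat).map
    (fun cell => win_masks.filter (fun m => (m.toNat >>> cell) &&& 1 == 1))

-- ===== PRECONDITION & SPEC =====

-- Pre_ = exactly the inputs on which Python A returns: every mask nonnegative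
-- with all set bits below rows*cols (otherwise the lsb loop indexes cm out of
-- range and A raises IndexError).
-- (m < 2^(rows*cols) is stated via log2 — i.e. the mask's bit_length is at most
-- rows*cols — so the condition is checkable even when rows*cols is huge)
def Pre_build_cell_masks_py (rows : Int) (cols : Int) (win_masks : List Int) : Prop :=
  ∀ m ∈ win_masks, 0 ≤ m ∧ (m = 0 ∨ ((m.toNat).log2 : Int) < rows * cols)

instance (rows : Int) (cols : Int) (win_masks : List Int) : Decidable (Pre_build_cell_masks_py rows cols win_masks) := by unfold Pre_build_cell_masks_py; infer_instance

def pvWitness_build_cell_masks_py : Int × Int × List Int := (2, 2, [3, 9, 6])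

def Spec_build_cell_masks_py (rows : Int) (cols : Int) (win_masks : List Int) (out : List (List Int)) : Prop := out = build_cell_masks_py_alt rows cols win_masks
instance (rows : Int) (cols : Int) (win_masks : List Int) (out : List (List Int)) : Decidable (Spec_build_cell_masks_py rows cols win_masks out) := by unfold Spec_build_cell_masks_py; infer_instance

-- ===== CLAIM (what is proved, stated in full; the proofs are below) =====
def Claim_equal_build_cell_masks_py : Prop := ∀ (rows : Int) (cols : Int) (win_masks : List Int), Dom_build_cell_masks_py rows cols win_masks → Pre_build_cell_masks_py rows cols win_masks → Spec_build_cell_masks_py rows cols win_masks (build_cell_masks_py rows cols win_masks)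


-- ===== LEMMAS AND PROOFS =====

theorem pv_and_oe (x y : Nat) : (2*x+1) &&& (2*y) = 2*(x &&& y) := by
  have := Nat.bitwise_bit (f := and) (a := true) (m := x) (b := false) (n := y) (by simp)
  simpa [Nat.bit, HAnd.hAnd, AndOp.and, Nat.land, Nat.mul_comm] using this

theorem pv_and_ee (x y : Nat) : (2*x) &&& (2*y+1) = 2*(x &&& y) := by
  have := Nat.bitwise_bit (f := and) (a := false) (m := x) (b := true) (n := y) (by simp)
  simpa [Nat.bit, HAnd.hAnd, AndOp.and, Nat.land, Nat.mul_comm] using this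

theorem pv_xor_oo (x y : Nat) : (2*x+1) ^^^ (2*y+1) = 2*(x ^^^ y) := by
  have := Nat.bitwise_bit (f := bne) (a := true) (m := x) (b := true) (n := y) (by simp)
  simpa [Nat.bit, HXor.hXor, XorOp.xor, Nat.xor, Nat.mul_comm] using this

theorem pv_xor_ee (x y : Nat) : (2*x) ^^^ (2*y) = 2*(x ^^^ y) := by
  have := Nat.bitwise_bit (f := bne) (a := false) (m := x) (b := false) (n := y) (by simp)
  simpa [Nat.bit, HXor.hXor, XorOp.xor, Nat.xor, Nat.mul_comm] using this

theorem pv_lsb (t : Nat) (h : t ≠ 0) :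
    ∃ k, t - (t &&& (t - 1)) = 2 ^ k ∧ t.testBit k = true ∧ t &&& (t - 1) = t ^^^ 2 ^ k := by
  induction t using Nat.strong_induction_on with
  | _ t IH =>
    rcases Nat.even_or_odd t with ⟨u, hu⟩ | ⟨u, hu⟩
    · -- t = 2*u even, u ≠ 0
      have hu0 : u ≠ 0 := by omega
      obtain ⟨k, h1, h2, h3⟩ := IH u (by omega) hu0
      have ha : t &&& (t - 1) = 2 * (u &&& (u - 1)) := by
        have : t - 1 = 2*(u-1)+1 := by omega
        rw [this, show t = 2*u by omega, pv_and_ee]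
      refine ⟨k + 1, ?_, ?_, ?_⟩
      · have hle : u &&& (u-1) ≤ u := Nat.and_le_left
        rw [ha]; omega
      · rw [show t = 2*u by omega]
        have : (2*u).testBit (k+1) = u.testBit k := by
          simpa [Nat.bit] using Nat.testBit_bit_succ k false u
        rw [this]; exact h2
      · rw [ha, show t = 2*u by omega, pow_succ, show 2^k*2 = 2*2^k by ring, pv_xor_ee, ← h3]
    · -- t = 2*u+1 odd
      refine ⟨0, ?_, ?_, ?_⟩
      · have ha : t &&& (t - 1) = 2*u := by
          rw [show t = 2*u+1 by omega, show 2*u+1-1 = 2*u by omega, pv_and_oe]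
          simp
        rw [ha]; omega
      · rw [show t = 2*u+1 by omega]
        simp
      · rw [show t = 2*u+1 by omega, show 2*u+1-1 = 2*u by omega, pv_and_oe,
          show (2:Nat)^0 = 2*0+1 by norm_num, pv_xor_oo]
        simp

-- inner 'while t:' loop of A; t is m's remaining bits. Pre_ admits only m ≥ 0,
-- on which Python's t & -t equals t - (t & (t-1)) (the lowest set bit) and
-- lsb.bit_length() - 1 equals Nat.log2 lsb; out-of-range cm[...] (a Python
-- IndexError, excluded by Pre_) is a no-op of List.set/getD here.

theorem pvLsbLoop_length (m : Int) (fuel t : Nat) (cm : List (List Int)) :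
    (pvLsbLoop m fuel t cm).length = cm.length := by
  induction fuel generalizing t cm with
  | zero => rfl
  | succ fuel IH =>
    rw [pvLsbLoop]
    by_cases ht : t = 0
    · simp [ht]
    · simp only [ht, if_neg, not_false_iff]
      rw [IH, List.length_set]

theorem pvLsbLoop_getD (m : Int) (fuel t : Nat) (cm : List (List Int)) (hf : t ≤ fuel)
    (hb : ∀ j, t.testBit j = true → j < cm.length) (i : Nat) :
    (pvLsbLoop m fuel t cm).getD i [] = cm.getD i [] ++ (if t.testBit i then [m] else []) := by
  induction fuel generalizing t cm with
  | zero =>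
    have ht : t = 0 := by omega
    simp [pvLsbLoop, ht]
  | succ fuel IH =>
    by_cases ht : t = 0
    · simp [pvLsbLoop, ht]
    · obtain ⟨k, h1, h2, h3⟩ := pv_lsb t ht
      have hk : k < cm.length := hb k h2
      rw [pvLsbLoop]
      simp only [ht, if_neg, not_false_iff]
      rw [h1, Nat.log2_two_pow, ← h3]
      set a := t &&& (t - 1) with ha
      have halt : a < t := Nat.lt_of_le_of_lt Nat.and_le_right (by omega)
      set cm' := cm.set k (cm.getD k [] ++ [m]) with hcm'
      have hb' : ∀ j, a.testBit j = true → j < cm'.length := by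
        intro j hj
        rw [hcm', List.length_set]
        have htj : t.testBit j = true := by
          rw [ha, Nat.testBit_and, Bool.and_eq_true] at hj
          exact hj.1
        exact hb j htj
      rw [IH a cm' (by omega) hb']
      have hat : ∀ j, a.testBit j = (t.testBit j && !(decide (k = j))) := by
        intro j
        rw [h3, Nat.testBit_xor, Nat.testBit_two_pow]
        cases hj : t.testBit j <;> rcases eq_or_ne k j with rfl | hkj <;>
          simp_all
      by_cases hik : i = k
      · subst hik
        have : cm'.getD i [] = cm.getD i [] ++ [m] := by
          simp [hcm', List.getD_eq_getElem?_getD, List.getElem?_set_self hk]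
        rw [this, hat i]
        simp [h2]
      · have : cm'.getD i [] = cm.getD i [] := by
          simp [hcm', List.getD_eq_getElem?_getD, List.getElem?_set_ne (Ne.symm hik)]
        rw [this, hat i]
        simp [Ne.symm hik]

theorem pvFold_length (ms : List Int) (cm : List (List Int)) :
    (ms.foldl (fun cm m => pvLsbLoop m m.toNat m.toNat cm) cm).length = cm.length := by
  induction ms generalizing cm with
  | nil => rfl
  | cons m ms ih => rw [List.foldl_cons, ih, pvLsbLoop_length]

theorem pvFold_getD (ms : List Int) (cm : List (List Int))
    (h : ∀ m ∈ ms, m.toNat < 2 ^ cm.length) (i : Nat) :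
    (ms.foldl (fun cm m => pvLsbLoop m m.toNat m.toNat cm) cm).getD i []
      = cm.getD i [] ++ ms.filter (fun m => (m.toNat).testBit i) := by
  induction ms generalizing cm with
  | nil => simp
  | cons m ms ih =>
    have hb : ∀ j, (m.toNat).testBit j = true → j < cm.length := by
      intro j hj
      by_contra hlt
      have : m.toNat < 2 ^ j :=
        Nat.lt_of_lt_of_le (h m (by simp)) (Nat.pow_le_pow_right (by norm_num) (by omega))
      simp [Nat.testBit_eq_false_of_lt this] at hj
    rw [List.foldl_cons, ih _ (by intro x hx; rw [pvLsbLoop_length]; exact h x (by simp [hx])),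
      pvLsbLoop_getD m m.toNat m.toNat cm (le_refl _) hb i, List.filter_cons]
    by_cases hbit : (m.toNat).testBit i <;> simp [hbit]

theorem pv_testBit_eq (m i : Nat) : m.testBit i = ((m >>> i) &&& 1 == 1) := by
  simp [Nat.testBit]

-- ===== VERDICT (by name: the statement is the Claim_ definition above) =====
theorem build_cell_masks_py_spec : Claim_equal_build_cell_masks_py := by
  intro rows cols ms _ hpre
  unfold Spec_build_cell_masks_py build_cell_masks_py build_cell_masks_py_alt
  set L := (rows * cols).toNat with hL
  have hlen : (ms.foldl (fun cm m => pvLsbLoop m m.toNat m.toNat cm) (List.replicate L ([] : List Int))).length = L := by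
    rw [pvFold_length, List.length_replicate]
  apply List.ext_getElem
  · simp [hlen]
  · intro i hi1 hi2
    have hiL : i < L := by simpa [hlen] using hi1
    have hnat : ∀ m ∈ ms, m.toNat < 2 ^ (List.replicate L ([] : List Int)).length := by
      intro m hm
      obtain ⟨h0, h1⟩ := hpre m hm
      rw [List.length_replicate]
      rcases Nat.eq_zero_or_pos m.toNat with hm0 | hmpos
      · rw [hm0]; positivity
      · rcases h1 with rfl | hlog
        · simp at hmpos
        · have hlt : (m.toNat).log2 < L := by rw [hL]; omega
          exact (Nat.log2_lt (by omega)).mp hlt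
    have hA := pvFold_getD ms (List.replicate L ([] : List Int)) hnat i
    rw [List.getD_eq_getElem _ _ hi1] at hA
    rw [hA, List.getD_replicate _ hiL]
    simp only [List.getElem_map, List.getElem_range, List.nil_append]
    apply List.filter_congr
    intro m _
    exact pv_testBit_eq m.toNat i
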